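-- pv_equiv track=rewrite | github.com/hengxiao/WorkspaceHarness | cli/src/harness/bootstrap.py | _preserve_keep_blocks
-- ===== SOURCE A (Python) =====
-- KEEP_MARKER_BEGIN = "# HARNESS:KEEP:BEGIN"
--
-- KEEP_MARKER_END = "# HARNESS:KEEP:END"
--
-- def _preserve_keep_blocks(existing: str, generated: str) -> str:
--     """Carry hand-edited KEEP blocks from `existing` into `generated`.
--
--     Anything between matching KEEP:BEGIN/KEEP:END markers in `existing`
--     overrides the same-named block in `generated`. Block names match by line.
--     """
--     if KEEP_MARKER_BEGIN not in existing:
--         return generated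
--     out_lines = generated.splitlines(keepends=True)
--     existing_blocks = _extract_keep_blocks(existing)
--     if not existing_blocks:
--         return generated
--     rendered: list[str] = []
--     skipping = False
--     current_name: str | None = None
--     for line in out_lines:
--         if KEEP_MARKER_BEGIN in line and not skipping:
--             current_name = line.split(KEEP_MARKER_BEGIN, 1)[1].strip()
--             rendered.append(line)
--             if current_name in existing_blocks:
--                 rendered.extend(existing_blocks[current_name])
--                 skipping = True
--             continue
--         if KEEP_MARKER_END in line and skipping:
--             rendered.append(line)
--             skipping = False
--             current_name = None
--             continue
--         if not skipping:
--             rendered.append(line)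
--     return "".join(rendered)
--
-- def _extract_keep_blocks(text: str) -> dict[str, list[str]]:
--     blocks: dict[str, list[str]] = {}
--     current_name: str | None = None
--     current_lines: list[str] = []
--     for line in text.splitlines(keepends=True):
--         if KEEP_MARKER_BEGIN in line:
--             current_name = line.split(KEEP_MARKER_BEGIN, 1)[1].strip()
--             current_lines = []
--         elif KEEP_MARKER_END in line and current_name is not None:
--             blocks[current_name] = current_lines
--             current_name = None
--         elif current_name is not None:
--             current_lines.append(line)
--     return blocks
-- ===== SOURCE B (Python) =====
-- KEEP_MARKER_BEGIN = "# HARNESS:KEEP:BEGIN"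
-- KEEP_MARKER_END = "# HARNESS:KEEP:END"
--
--
-- def _block_name(line):
--     return line.split(KEEP_MARKER_BEGIN, 1)[1].strip()
--
--
-- def _find_line(lines, start, pred):
--     for k in range(start, len(lines)):
--         if pred(lines[k]):
--             return k
--     return None
--
--
-- def _extract(lines):
--     """Dict name -> body, by hopping from marker line to marker line."""
--     blocks = {}
--     i = 0
--     while True:
--         b = _find_line(lines, i, lambda l: KEEP_MARKER_BEGIN in l)
--         if b is None:
--             return blocks
--         m = _find_line(lines, b + 1,
--                        lambda l: KEEP_MARKER_BEGIN in l or KEEP_MARKER_END in l)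
--         if m is None:
--             return blocks
--         if KEEP_MARKER_BEGIN in lines[m]:
--             i = m  # a new BEGIN restarts a block; the open one is discarded
--         else:
--             blocks[_block_name(lines[b])] = lines[b + 1:m]
--             i = m + 1
--
--
-- def _render(lines, blocks):
--     out = []
--     i = 0
--     while True:
--         j = _find_line(lines, i, lambda l: KEEP_MARKER_BEGIN in l)
--         if j is None:
--             out.extend(lines[i:])
--             return out
--         out.extend(lines[i:j + 1])
--         body = blocks.get(_block_name(lines[j]))
--         if body is None:
--             i = j + 1
--             continue
--         out.extend(body)
--         e = _find_line(lines, j + 1, lambda l: KEEP_MARKER_END in l)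
--         if e is None:
--             return out
--         out.append(lines[e])
--         i = e + 1
--
--
-- def _preserve_keep_blocks(existing: str, generated: str) -> str:
--     blocks = _extract(existing.splitlines(keepends=True))
--     if not blocks:
--         return generated
--     return "".join(_render(generated.splitlines(keepends=True), blocks))
-- ===== Notes on version B (the rewrite author's own statement) =====
-- stated objective: alternative
-- what changed: Replaces both line-by-line state machines (skipping flag / current_name accumulator) by marker-to-marker index hops: find-next-BEGIN / find-next-END over the line list, splicing whole slices, with the redundant 'marker in existing' pre-check dropped.
import Mathlib
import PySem

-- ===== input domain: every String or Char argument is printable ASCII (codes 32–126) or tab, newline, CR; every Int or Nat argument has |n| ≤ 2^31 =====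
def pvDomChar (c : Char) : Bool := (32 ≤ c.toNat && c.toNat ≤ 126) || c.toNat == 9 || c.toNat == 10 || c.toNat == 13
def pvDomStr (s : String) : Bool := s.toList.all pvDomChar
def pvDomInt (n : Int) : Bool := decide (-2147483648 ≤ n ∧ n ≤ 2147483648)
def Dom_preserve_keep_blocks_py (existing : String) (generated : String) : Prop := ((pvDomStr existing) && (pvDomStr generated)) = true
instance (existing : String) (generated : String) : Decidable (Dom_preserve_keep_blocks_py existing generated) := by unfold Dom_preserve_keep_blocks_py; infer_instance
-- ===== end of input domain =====

-- B replaces A's two line-by-line state machines by marker-to-marker index hops over the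
-- line list (find next BEGIN / next END, splice whole slices); objective: alternative.

-- ===== shared helpers (the Python constants and the two builtin calls both sources make) =====
def pvBegin : List Char := "# HARNESS:KEEP:BEGIN".toList
def pvEnd : List Char := "# HARNESS:KEEP:END".toList

-- s.splitlines(keepends=True), hand-ported (exact on the Dom alphabet: the only line
-- breaks there are '\n', '\r' and '\r\n')
def splitKeepAux (cs : List Char) (acc : List Char) : List (List Char) :=
  match cs with
  | [] => if acc.isEmpty then [] else [acc.reverse]
  | c :: rest =>
    if c = '\n' then (acc.reverse ++ ['\n']) :: splitKeepAux rest []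
    else if c = '\r' then
      match hr : rest with
      | '\n' :: rest2 => (acc.reverse ++ ['\r', '\n']) :: splitKeepAux rest2 []
      | _ => (acc.reverse ++ ['\r']) :: splitKeepAux rest []
    else splitKeepAux rest (c :: acc)
termination_by cs.length
decreasing_by all_goals first
  | subst hr; simp only [List.length_cons]; omega
  | simp only [List.length_cons]; omega

def splitKeep (cs : List Char) : List (List Char) := splitKeepAux cs []

-- line.split(KEEP_MARKER_BEGIN, 1)[1].strip()  (both sources compute the name this way;
-- the [1] exists whenever the marker occurs in the line, so getD is exact there)
def nameOf (line : List Char) : List Char :=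
  PySem.Chars.strip ((PySem.Chars.splitOnMax line pvBegin 1).getD 1 [])

-- ===== PORT A =====
-- _extract_keep_blocks: one pass, state (blocks, current_name, current_lines)
def pvExtractStep (st : PySem.Dict (List Char) (List (List Char)) × Option (List Char) × List (List Char))
    (line : List Char) : PySem.Dict (List Char) (List (List Char)) × Option (List Char) × List (List Char) :=
  let (blocks, cur, curLines) := st
  if PySem.Chars.isIn pvBegin line then (blocks, some (nameOf line), [])
  else if PySem.Chars.isIn pvEnd line && cur.isSome then (blocks.insert (cur.getD []) curLines, none, [])
  else if cur.isSome then (blocks, cur, curLines ++ [line])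
  else (blocks, cur, curLines)

def pvExtractA (lines : List (List Char)) : PySem.Dict (List Char) (List (List Char)) :=
  (lines.foldl pvExtractStep (PySem.Dict.empty, none, [])).1

-- the render loop of _preserve_keep_blocks: state (rendered, skipping, current_name)
def pvRenderStep (blocks : PySem.Dict (List Char) (List (List Char)))
    (st : List (List Char) × Bool × Option (List Char)) (line : List Char) :
    List (List Char) × Bool × Option (List Char) :=
  let (out, skipping, cur) := st
  if PySem.Chars.isIn pvBegin line && !skipping then
    let name := nameOf line
    if blocks.contains name then (out ++ [line] ++ blocks.getD name [], true, some name)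
    else (out ++ [line], skipping, some name)
  else if PySem.Chars.isIn pvEnd line && skipping then (out ++ [line], false, none)
  else if !skipping then (out ++ [line], skipping, cur)
  else (out, skipping, cur)

def preserve_keep_blocks_py (existing : String) (generated : String) : String :=
  if PySem.Str.isIn "# HARNESS:KEEP:BEGIN" existing = false then generated
  else
    let outLines := splitKeep generated.toList
    let blocks := pvExtractA (splitKeep existing.toList)
    if blocks.size = 0 then generated
    else String.ofList (PySem.Chars.join [] ((outLines.foldl (pvRenderStep blocks) ([], false, none)).1))

-- ===== PORT B =====
-- _extract by marker hops: find next BEGIN line, then the next marker line after it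
def pvExtractB (blocks : PySem.Dict (List Char) (List (List Char))) (lines : List (List Char)) :
    PySem.Dict (List Char) (List (List Char)) :=
  match hb : List.findIdx? (fun l => PySem.Chars.isIn pvBegin l) lines with
  | none => blocks
  | some b =>
    match List.findIdx? (fun l => PySem.Chars.isIn pvBegin l || PySem.Chars.isIn pvEnd l) (lines.drop (b+1)) with
    | none => blocks
    | some m =>
      if PySem.Chars.isIn pvBegin ((lines.drop (b+1)).getD m []) then
        pvExtractB blocks ((lines.drop (b+1)).drop m)
      else
        pvExtractB (blocks.insert (nameOf (lines.getD b [])) ((lines.drop (b+1)).take m))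
          ((lines.drop (b+1)).drop (m+1))
termination_by lines.length
decreasing_by
  all_goals
    obtain ⟨hblt, -⟩ := List.findIdx?_eq_some_iff_getElem.mp hb
    simp only [List.length_drop]
    omega

-- _render by marker hops
def pvRenderB (blocks : PySem.Dict (List Char) (List (List Char))) (lines : List (List Char)) :
    List (List Char) :=
  match hj : List.findIdx? (fun l => PySem.Chars.isIn pvBegin l) lines with
  | none => lines
  | some j =>
    match blocks.get? (nameOf (lines.getD j [])) with
    | none => lines.take (j+1) ++ pvRenderB blocks (lines.drop (j+1))
    | some body =>
      match List.findIdx? (fun l => PySem.Chars.isIn pvEnd l) (lines.drop (j+1)) with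
      | none => lines.take (j+1) ++ body
      | some e =>
        lines.take (j+1) ++ body ++ [(lines.drop (j+1)).getD e []] ++
          pvRenderB blocks ((lines.drop (j+1)).drop (e+1))
termination_by lines.length
decreasing_by
  all_goals
    obtain ⟨hjlt, -⟩ := List.findIdx?_eq_some_iff_getElem.mp hj
    simp only [List.length_drop]
    omega

def preserve_keep_blocks_py_alt (existing : String) (generated : String) : String :=
  let blocks := pvExtractB PySem.Dict.empty (splitKeep existing.toList)
  if blocks.size = 0 then generated
  else String.ofList (PySem.Chars.join [] (pvRenderB blocks (splitKeep generated.toList)))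

-- ===== PRECONDITION & SPEC =====
def Spec_preserve_keep_blocks_py (existing : String) (generated : String) (out : String) : Prop := out = preserve_keep_blocks_py_alt existing generated
instance (existing : String) (generated : String) (out : String) : Decidable (Spec_preserve_keep_blocks_py existing generated out) := by unfold Spec_preserve_keep_blocks_py; infer_instance

-- ===== CLAIM (what is proved, stated in full; the proofs are below) =====
def Claim_equal_preserve_keep_blocks_py : Prop := ∀ (existing : String) (generated : String), Dom_preserve_keep_blocks_py existing generated → Spec_preserve_keep_blocks_py existing generated (preserve_keep_blocks_py existing generated)

-- ===== LEMMAS AND PROOFS =====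

-- every line produced by splitlines is an infix of the text
theorem splitKeepAux_infix (cs : List Char) (acc : List Char) :
    ∀ l ∈ splitKeepAux cs acc, l <:+: (acc.reverse ++ cs) := by
  fun_induction splitKeepAux cs acc
  · intro l hl; simp at hl
  · intro l hl
    simp only [List.mem_singleton] at hl; subst hl; simp
  · -- c = '\n'
    rename_i acc rest ih
    intro l hl
    rcases List.mem_cons.mp hl with rfl | hl2
    · exact ⟨[], rest, by simp⟩
    · have h2 := ih l hl2
      simp only [List.reverse_nil, List.nil_append] at h2
      exact h2.trans ((List.suffix_cons _ _).trans (List.suffix_append _ _)).isInfix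
  · -- c = '\r', rest = '\n' :: rest2
    rename_i acc rest2 hne ih
    intro l hl
    rcases List.mem_cons.mp hl with rfl | hl2
    · exact ⟨[], rest2, by simp⟩
    · have h2 := ih l hl2
      simp only [List.reverse_nil, List.nil_append] at h2
      exact h2.trans (((List.suffix_cons _ _).trans (List.suffix_cons _ _)).trans
        (List.suffix_append _ _)).isInfix
  · -- c = '\r', rest not starting with '\n'
    rename_i acc rest hnonl hne ih
    intro l hl
    rcases List.mem_cons.mp hl with rfl | hl2
    · exact ⟨[], rest, by simp⟩
    · have h2 := ih l hl2
      simp only [List.reverse_nil, List.nil_append] at h2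
      exact h2.trans ((List.suffix_cons _ _).trans (List.suffix_append _ _)).isInfix
  · -- ordinary character
    rename_i acc c rest hn hr ih
    intro l hl
    have h2 := ih l hl
    simp only [List.reverse_cons, List.append_assoc, List.singleton_append] at h2
    exact h2

-- non-dependent unfolding equations for the two hop functions
theorem pvExtractB_eq (d : PySem.Dict (List Char) (List (List Char))) (lines : List (List Char)) :
    pvExtractB d lines =
      match List.findIdx? (fun l => PySem.Chars.isIn pvBegin l) lines with
      | none => d
      | some b =>
        match List.findIdx? (fun l => PySem.Chars.isIn pvBegin l || PySem.Chars.isIn pvEnd l)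
            (lines.drop (b+1)) with
        | none => d
        | some m =>
          if PySem.Chars.isIn pvBegin ((lines.drop (b+1)).getD m []) then
            pvExtractB d ((lines.drop (b+1)).drop m)
          else
            pvExtractB (d.insert (nameOf (lines.getD b [])) ((lines.drop (b+1)).take m))
              ((lines.drop (b+1)).drop (m+1)) := by
  rw [pvExtractB.eq_def]
  split
  · rename_i hb; rw [hb]
  · rename_i b hb; rw [hb]

theorem pvRenderB_eq (blocks : PySem.Dict (List Char) (List (List Char))) (lines : List (List Char)) :
    pvRenderB blocks lines =
      match List.findIdx? (fun l => PySem.Chars.isIn pvBegin l) lines with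
      | none => lines
      | some j =>
        match blocks.get? (nameOf (lines.getD j [])) with
        | none => lines.take (j+1) ++ pvRenderB blocks (lines.drop (j+1))
        | some body =>
          match List.findIdx? (fun l => PySem.Chars.isIn pvEnd l) (lines.drop (j+1)) with
          | none => lines.take (j+1) ++ body
          | some e =>
            lines.take (j+1) ++ body ++ [(lines.drop (j+1)).getD e []] ++
              pvRenderB blocks ((lines.drop (j+1)).drop (e+1)) := by
  rw [pvRenderB.eq_def]
  split
  · rename_i hj; rw [hj]
  · rename_i j hj; rw [hj]

theorem pvExtractB_none {lines : List (List Char)} (d : PySem.Dict (List Char) (List (List Char)))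
    (h : List.findIdx? (fun l => PySem.Chars.isIn pvBegin l) lines = none) :
    pvExtractB d lines = d := by
  rw [pvExtractB_eq, h]

theorem pvExtractB_cons_noBegin {l : List Char} (t : List (List Char))
    (d : PySem.Dict (List Char) (List (List Char))) (h : PySem.Chars.isIn pvBegin l = false) :
    pvExtractB d (l :: t) = pvExtractB d t := by
  rw [pvExtractB_eq, pvExtractB_eq d t]
  cases hf : List.findIdx? (fun l => PySem.Chars.isIn pvBegin l) t with
  | none => simp [List.findIdx?_cons, h, hf]
  | some b => simp [List.findIdx?_cons, h, hf]

-- the skip-mode continuation of B's extractor (proof-side only)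
def pvExCont (blocks : PySem.Dict (List Char) (List (List Char))) (n : List Char)
    (cur : List (List Char)) (lines : List (List Char)) : PySem.Dict (List Char) (List (List Char)) :=
  match List.findIdx? (fun l => PySem.Chars.isIn pvBegin l || PySem.Chars.isIn pvEnd l) lines with
  | none => blocks
  | some m =>
    if PySem.Chars.isIn pvBegin (lines.getD m []) then pvExtractB blocks (lines.drop m)
    else pvExtractB (blocks.insert n (cur ++ lines.take m)) (lines.drop (m+1))

theorem pvExtractB_cons_begin {l : List Char} (t : List (List Char))
    (d : PySem.Dict (List Char) (List (List Char))) (h : PySem.Chars.isIn pvBegin l = true) :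
    pvExtractB d (l :: t) = pvExCont d (nameOf l) [] t := by
  rw [pvExtractB_eq]
  have h0 : List.findIdx? (fun l => PySem.Chars.isIn pvBegin l) (l :: t) = some 0 := by
    simp [List.findIdx?_cons, h]
  simp only [h0, pvExCont]
  cases hf : List.findIdx? (fun l => PySem.Chars.isIn pvBegin l || PySem.Chars.isIn pvEnd l) t with
  | none => simp [hf]
  | some m => simp [hf]

theorem pvExCont_nil (d : PySem.Dict (List Char) (List (List Char))) (n : List Char)
    (cur : List (List Char)) : pvExCont d n cur [] = d := by
  simp [pvExCont]

theorem pvExCont_cons_begin {l : List Char} (t : List (List Char))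
    (d : PySem.Dict (List Char) (List (List Char))) (n : List Char) (cur : List (List Char))
    (h : PySem.Chars.isIn pvBegin l = true) :
    pvExCont d n cur (l :: t) = pvExCont d (nameOf l) [] t := by
  rw [pvExCont]
  have h0 : List.findIdx? (fun l => PySem.Chars.isIn pvBegin l || PySem.Chars.isIn pvEnd l)
      (l :: t) = some 0 := by simp [List.findIdx?_cons, h]
  simp only [h0, List.getD_cons_zero, List.drop_zero, h, if_pos]
  exact pvExtractB_cons_begin t d h

theorem pvExCont_cons_end {l : List Char} (t : List (List Char))
    (d : PySem.Dict (List Char) (List (List Char))) (n : List Char) (cur : List (List Char))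
    (hB : PySem.Chars.isIn pvBegin l = false) (hE : PySem.Chars.isIn pvEnd l = true) :
    pvExCont d n cur (l :: t) = pvExtractB (d.insert n cur) t := by
  rw [pvExCont]
  have h0 : List.findIdx? (fun l => PySem.Chars.isIn pvBegin l || PySem.Chars.isIn pvEnd l)
      (l :: t) = some 0 := by simp [List.findIdx?_cons, hB, hE]
  simp [h0, hB]

theorem pvExCont_cons_noMarker {l : List Char} (t : List (List Char))
    (d : PySem.Dict (List Char) (List (List Char))) (n : List Char) (cur : List (List Char))
    (hB : PySem.Chars.isIn pvBegin l = false) (hE : PySem.Chars.isIn pvEnd l = false) :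
    pvExCont d n cur (l :: t) = pvExCont d n (cur ++ [l]) t := by
  rw [pvExCont, pvExCont]
  cases hf : List.findIdx? (fun l => PySem.Chars.isIn pvBegin l || PySem.Chars.isIn pvEnd l) t with
  | none => simp [List.findIdx?_cons, hB, hE, hf]
  | some m =>
    simp only [List.findIdx?_cons, hB, hE, hf, Bool.or_self, Bool.false_eq_true, if_false,
      Option.map_some]
    simp only [List.getD_cons_succ, List.drop_succ_cons, List.take_succ_cons]
    have : cur ++ l :: t.take m = (cur ++ [l]) ++ t.take m := by simp
    rw [this]

theorem pvExtract_fold (lines : List (List Char)) :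
    (∀ (d : PySem.Dict (List Char) (List (List Char))),
       (lines.foldl pvExtractStep (d, none, [])).1 = pvExtractB d lines) ∧
    (∀ (d : PySem.Dict (List Char) (List (List Char))) (n : List Char) (cur : List (List Char)),
       (lines.foldl pvExtractStep (d, some n, cur)).1 = pvExCont d n cur lines) := by
  induction lines with
  | nil =>
    refine ⟨fun d => ?_, fun d n cur => ?_⟩
    · rw [List.foldl_nil, pvExtractB_none d (by simp)]
    · rw [List.foldl_nil, pvExCont_nil]
  | cons l t ih =>
    obtain ⟨ih1, ih2⟩ := ih
    refine ⟨fun d => ?_, fun d n cur => ?_⟩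
    · by_cases hB : PySem.Chars.isIn pvBegin l
      · have hstep : pvExtractStep (d, none, []) l = (d, some (nameOf l), []) := by
          simp [pvExtractStep, hB]
        rw [List.foldl_cons, hstep, ih2, pvExtractB_cons_begin t d hB]
      · rw [Bool.not_eq_true] at hB
        have hstep : pvExtractStep (d, none, []) l = (d, none, []) := by
          simp [pvExtractStep, hB]
        rw [List.foldl_cons, hstep, ih1, pvExtractB_cons_noBegin t d hB]
    · by_cases hB : PySem.Chars.isIn pvBegin l
      · have hstep : pvExtractStep (d, some n, cur) l = (d, some (nameOf l), []) := by
          simp [pvExtractStep, hB]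
        rw [List.foldl_cons, hstep, ih2, pvExCont_cons_begin t d n cur hB]
      · rw [Bool.not_eq_true] at hB
        by_cases hE : PySem.Chars.isIn pvEnd l
        · have hstep : pvExtractStep (d, some n, cur) l = (d.insert n cur, none, []) := by
            simp [pvExtractStep, hB, hE]
          rw [List.foldl_cons, hstep, ih1, pvExCont_cons_end t d n cur hB hE]
        · rw [Bool.not_eq_true] at hE
          have hstep : pvExtractStep (d, some n, cur) l = (d, some n, cur ++ [l]) := by
            simp [pvExtractStep, hB, hE]
          rw [List.foldl_cons, hstep, ih2, pvExCont_cons_noMarker t d n cur hB hE]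

-- the skip-mode continuation of B's renderer (proof-side only)
def pvRCont (blocks : PySem.Dict (List Char) (List (List Char))) (lines : List (List Char)) :
    List (List Char) :=
  match List.findIdx? (fun l => PySem.Chars.isIn pvEnd l) lines with
  | none => []
  | some e => lines.getD e [] :: pvRenderB blocks (lines.drop (e+1))

theorem pvRCont_nil (blocks : PySem.Dict (List Char) (List (List Char))) :
    pvRCont blocks [] = [] := by
  simp [pvRCont]

theorem pvRCont_cons_end {l : List Char} (blocks : PySem.Dict (List Char) (List (List Char)))
    (t : List (List Char)) (h : PySem.Chars.isIn pvEnd l = true) :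
    pvRCont blocks (l :: t) = l :: pvRenderB blocks t := by
  rw [pvRCont]
  have h0 : List.findIdx? (fun l => PySem.Chars.isIn pvEnd l) (l :: t) = some 0 := by
    simp [List.findIdx?_cons, h]
  simp [h0]

theorem pvRCont_cons_noEnd {l : List Char} (blocks : PySem.Dict (List Char) (List (List Char)))
    (t : List (List Char)) (h : PySem.Chars.isIn pvEnd l = false) :
    pvRCont blocks (l :: t) = pvRCont blocks t := by
  rw [pvRCont, pvRCont]
  cases hf : List.findIdx? (fun l => PySem.Chars.isIn pvEnd l) t with
  | none => simp [List.findIdx?_cons, h, hf]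
  | some e => simp [List.findIdx?_cons, h, hf]

theorem pvRenderB_cons_noBegin {l : List Char} (blocks : PySem.Dict (List Char) (List (List Char)))
    (t : List (List Char)) (h : PySem.Chars.isIn pvBegin l = false) :
    pvRenderB blocks (l :: t) = l :: pvRenderB blocks t := by
  rw [pvRenderB_eq, pvRenderB_eq blocks t]
  cases hf : List.findIdx? (fun l => PySem.Chars.isIn pvBegin l) t with
  | none => simp [List.findIdx?_cons, h, hf]
  | some j =>
    simp only [List.findIdx?_cons, h, Bool.false_eq_true, if_false, hf, Option.map_some]
    simp only [List.getD_cons_succ, List.drop_succ_cons, List.take_succ_cons]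
    cases hg : blocks.get? (nameOf (t.getD j [])) with
    | none => simp
    | some body =>
      cases hf2 : List.findIdx? (fun l => PySem.Chars.isIn pvEnd l) (t.drop (j+1)) with
      | none => simp
      | some e => simp

theorem pvRenderB_cons_begin_none {l : List Char} (blocks : PySem.Dict (List Char) (List (List Char)))
    (t : List (List Char)) (hB : PySem.Chars.isIn pvBegin l = true)
    (hg : blocks.get? (nameOf l) = none) :
    pvRenderB blocks (l :: t) = l :: pvRenderB blocks t := by
  rw [pvRenderB_eq]
  have h0 : List.findIdx? (fun l => PySem.Chars.isIn pvBegin l) (l :: t) = some 0 := by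
    simp [List.findIdx?_cons, hB]
  simp [h0, hg]

theorem pvRenderB_cons_begin_some {l : List Char} (blocks : PySem.Dict (List Char) (List (List Char)))
    (t : List (List Char)) (body : List (List Char)) (hB : PySem.Chars.isIn pvBegin l = true)
    (hg : blocks.get? (nameOf l) = some body) :
    pvRenderB blocks (l :: t) = l :: (body ++ pvRCont blocks t) := by
  rw [pvRenderB_eq]
  have h0 : List.findIdx? (fun l => PySem.Chars.isIn pvBegin l) (l :: t) = some 0 := by
    simp [List.findIdx?_cons, hB]
  simp only [h0, List.getD_cons_zero, List.drop_succ_cons, List.drop_zero, hg, pvRCont]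
  cases hf : List.findIdx? (fun l => PySem.Chars.isIn pvEnd l) t with
  | none => simp
  | some e => simp

theorem pvRender_fold (blocks : PySem.Dict (List Char) (List (List Char))) (lines : List (List Char)) :
    (∀ (acc : List (List Char)) (cn : Option (List Char)),
       (lines.foldl (pvRenderStep blocks) (acc, false, cn)).1 = acc ++ pvRenderB blocks lines) ∧
    (∀ (acc : List (List Char)) (cn : Option (List Char)),
       (lines.foldl (pvRenderStep blocks) (acc, true, cn)).1 = acc ++ pvRCont blocks lines) := by
  induction lines with
  | nil =>
    refine ⟨fun acc cn => ?_, fun acc cn => ?_⟩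
    · rw [List.foldl_nil, pvRenderB_eq]
      simp
    · rw [List.foldl_nil, pvRCont_nil, List.append_nil]
  | cons l t ih =>
    obtain ⟨ih1, ih2⟩ := ih
    refine ⟨fun acc cn => ?_, fun acc cn => ?_⟩
    · by_cases hB : PySem.Chars.isIn pvBegin l
      · by_cases hc : blocks.contains (nameOf l)
        · have hget : blocks.get? (nameOf l) = some (blocks.getD (nameOf l) []) := by
            rw [PySem.Dict.getD_eq_get?_getD]
            rw [PySem.Dict.contains_eq_isSome_get?] at hc
            cases hg : blocks.get? (nameOf l) with
            | none => rw [hg] at hc; simp at hc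
            | some v => simp
          have hstep : pvRenderStep blocks (acc, false, cn) l =
              (acc ++ [l] ++ blocks.getD (nameOf l) [], true, some (nameOf l)) := by
            simp [pvRenderStep, hB, hc]
          rw [List.foldl_cons, hstep, ih2,
            pvRenderB_cons_begin_some blocks t (blocks.getD (nameOf l) []) hB hget]
          simp
        · rw [Bool.not_eq_true] at hc
          have hget : blocks.get? (nameOf l) = none := by
            rw [PySem.Dict.contains_eq_isSome_get?] at hc
            cases hg : blocks.get? (nameOf l) with
            | none => rfl
            | some v => rw [hg] at hc; simp at hc
          have hstep : pvRenderStep blocks (acc, false, cn) l =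
              (acc ++ [l], false, some (nameOf l)) := by
            simp [pvRenderStep, hB, hc]
          rw [List.foldl_cons, hstep, ih1, pvRenderB_cons_begin_none blocks t hB hget]
          simp
      · rw [Bool.not_eq_true] at hB
        have hstep : pvRenderStep blocks (acc, false, cn) l = (acc ++ [l], false, cn) := by
          simp [pvRenderStep, hB]
        rw [List.foldl_cons, hstep, ih1, pvRenderB_cons_noBegin blocks t hB]
        simp
    · by_cases hE : PySem.Chars.isIn pvEnd l
      · have hstep : pvRenderStep blocks (acc, true, cn) l = (acc ++ [l], false, none) := by
          simp [pvRenderStep, hE]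
        rw [List.foldl_cons, hstep, ih1, pvRCont_cons_end blocks t hE]
        simp
      · rw [Bool.not_eq_true] at hE
        have hstep : pvRenderStep blocks (acc, true, cn) l = (acc, true, cn) := by
          simp [pvRenderStep, hE]
        rw [List.foldl_cons, hstep, ih2, pvRCont_cons_noEnd blocks t hE]

-- ===== VERDICT (by name: the statement is the Claim_ definition above) =====
theorem preserve_keep_blocks_py_spec : Claim_equal_preserve_keep_blocks_py := by
  intro existing generated _
  unfold Spec_preserve_keep_blocks_py preserve_keep_blocks_py preserve_keep_blocks_py_alt
  have hblocks : pvExtractB PySem.Dict.empty (splitKeep existing.toList) =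
      pvExtractA (splitKeep existing.toList) :=
    ((pvExtract_fold (splitKeep existing.toList)).1 PySem.Dict.empty).symm
  by_cases hin : PySem.Str.isIn "# HARNESS:KEEP:BEGIN" existing
  · simp only [hin, Bool.true_eq_false, if_false]
    rw [hblocks]
    by_cases hz : (pvExtractA (splitKeep existing.toList)).size = 0
    · simp [hz]
    · simp only [hz, if_false]
      rw [(pvRender_fold (pvExtractA (splitKeep existing.toList))
        (splitKeep generated.toList)).1 [] none]
      rw [List.nil_append]
  · rw [Bool.not_eq_true] at hin
    simp only [hin]
    have hnone : List.findIdx? (fun l => PySem.Chars.isIn pvBegin l)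
        (splitKeep existing.toList) = none := by
      rw [List.findIdx?_eq_none_iff]
      intro l hl
      by_contra hcon
      rw [Bool.not_eq_false, PySem.Chars.isIn_iff_infix] at hcon
      have hinf : l <:+: existing.toList := by
        have := splitKeepAux_infix existing.toList [] l hl
        simpa using this
      have : PySem.Chars.isIn pvBegin existing.toList = true := by
        rw [PySem.Chars.isIn_iff_infix]
        exact hcon.trans hinf
      have hstr : PySem.Str.isIn "# HARNESS:KEEP:BEGIN" existing = true := by
        simpa [PySem.Str.isIn, pvBegin] using this
      rw [hstr] at hin
      exact absurd hin (by simp)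
    rw [pvExtractB_none PySem.Dict.empty hnone]
    simp [PySem.Dict.size_empty]
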